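-- pv_equiv track=rewrite | github.com/Mudrikkaushik/local_assistant | logic/web_scraper.py | _classify_pages
-- ===== SOURCE A (Python) =====
-- def _classify_pages(pages):
--     """Classify pages by type based on URL patterns and content"""
--     classifications = {
--         "homepage": 0,
--         "product": 0,
--         "blog": 0,
--         "about": 0,
--         "contact": 0,
--         "category": 0,
--         "other": 0
--     }
--
--     for page in pages:
--         url = page.get('url', '').lower()
--         title = page.get('title', '').lower()
--
--         if any(word in url for word in ['product', 'item', 'buy']) or any(word in title for word in ['product', 'buy', 'price']):
--             classifications["product"] += 1
--         elif any(word in url for word in ['blog', 'news', 'article', 'post']) or any(word in title for word in ['blog', 'news']):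
--             classifications["blog"] += 1
--         elif any(word in url for word in ['about', 'company', 'team']) or any(word in title for word in ['about', 'company']):
--             classifications["about"] += 1
--         elif any(word in url for word in ['contact', 'support', 'help']) or any(word in title for word in ['contact', 'support']):
--             classifications["contact"] += 1
--         elif any(word in url for word in ['category', 'section', 'department']) or len(url.split('/')) <= 4:
--             classifications["category"] += 1
--         elif url.endswith('/') and len(url.split('/')) == 4:
--             classifications["homepage"] += 1
--         else:
--             classifications["other"] += 1
--
--     return classifications
-- ===== SOURCE B (Python) =====
-- _KEYS = ("homepage", "product", "blog", "about", "contact", "category", "other")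
--
-- _SIEVE = [
--     ("product", lambda u, t: any(w in u for w in ('product', 'item', 'buy'))
--                              or any(w in t for w in ('product', 'buy', 'price'))),
--     ("blog", lambda u, t: any(w in u for w in ('blog', 'news', 'article', 'post'))
--                           or any(w in t for w in ('blog', 'news'))),
--     ("about", lambda u, t: any(w in u for w in ('about', 'company', 'team'))
--                            or any(w in t for w in ('about', 'company'))),
--     ("contact", lambda u, t: any(w in u for w in ('contact', 'support', 'help'))
--                              or any(w in t for w in ('contact', 'support'))),
--     ("category", lambda u, t: any(w in u for w in ('category', 'section', 'department'))
--                               or len(u.split('/')) <= 4),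
--     ("homepage", lambda u, t: u.endswith('/') and len(u.split('/')) == 4),
-- ]
--
--
-- def _classify_pages(pages):
--     # Sieve: pour all pages through a cascade of filters, one staged pass per
--     # category; what each filter retains is that category's count, the residue
--     # flows on to the next filter, and whatever survives the whole sieve is "other".
--     remaining = [(p.get('url', '').lower(), p.get('title', '').lower()) for p in pages]
--     counts = {}
--     for name, keep in _SIEVE:
--         counts[name] = sum(1 for u, t in remaining if keep(u, t))
--         remaining = [(u, t) for u, t in remaining if not keep(u, t)]
--     counts["other"] = len(remaining)
--     return {k: counts.get(k, 0) for k in _KEYS}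
-- ===== Notes on version B (the rewrite author's own statement) =====
-- stated objective: alternative
-- what changed: A makes one pass over the pages, dispatching each page through a seven-branch elif cascade and mutating a counts dict; B is a staged sieve: it lowercases all pages once, then runs one filtering pass per category over the shrinking remainder list (count the matches, keep the rest), with the final residue counted as 'other'.
import Mathlib
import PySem

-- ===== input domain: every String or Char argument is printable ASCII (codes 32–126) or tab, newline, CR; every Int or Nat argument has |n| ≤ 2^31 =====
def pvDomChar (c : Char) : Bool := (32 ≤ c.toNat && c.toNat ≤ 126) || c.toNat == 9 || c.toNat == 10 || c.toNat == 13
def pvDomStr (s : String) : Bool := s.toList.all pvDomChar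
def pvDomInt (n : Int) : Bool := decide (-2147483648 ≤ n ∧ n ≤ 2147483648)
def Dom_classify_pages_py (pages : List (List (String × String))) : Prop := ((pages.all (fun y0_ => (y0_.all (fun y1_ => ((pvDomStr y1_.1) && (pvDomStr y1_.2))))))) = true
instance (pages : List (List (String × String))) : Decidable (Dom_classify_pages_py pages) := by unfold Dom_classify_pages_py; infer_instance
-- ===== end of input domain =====

-- B replaces A's single pass with a per-page elif cascade by a staged sieve: one filtering pass per category over a shrinking remainder list (objective: alternative decomposition, same cost).

-- page.get('url', '').lower() / page.get('title', '').lower() — shared by both ports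
def pvUrl (page : List (String × String)) : String := PySem.Str.lower ((page.lookup "url").getD "")
def pvTitle (page : List (String × String)) : String := PySem.Str.lower ((page.lookup "title").getD "")

-- ===== PORT A =====
-- one iteration of A's for-loop: the elif cascade incrementing the dict entry
def pvAStep (d : PySem.Dict String Int) (page : List (String × String)) : PySem.Dict String Int :=
  if ["product", "item", "buy"].any (fun w => PySem.Str.isIn w (pvUrl page)) ||
     ["product", "buy", "price"].any (fun w => PySem.Str.isIn w (pvTitle page)) then
    d.modify "product" 0 (· + 1)
  else if ["blog", "news", "article", "post"].any (fun w => PySem.Str.isIn w (pvUrl page)) ||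
          ["blog", "news"].any (fun w => PySem.Str.isIn w (pvTitle page)) then
    d.modify "blog" 0 (· + 1)
  else if ["about", "company", "team"].any (fun w => PySem.Str.isIn w (pvUrl page)) ||
          ["about", "company"].any (fun w => PySem.Str.isIn w (pvTitle page)) then
    d.modify "about" 0 (· + 1)
  else if ["contact", "support", "help"].any (fun w => PySem.Str.isIn w (pvUrl page)) ||
          ["contact", "support"].any (fun w => PySem.Str.isIn w (pvTitle page)) then
    d.modify "contact" 0 (· + 1)
  else if ["category", "section", "department"].any (fun w => PySem.Str.isIn w (pvUrl page)) ||
          decide ((PySem.Chars.splitOn (pvUrl page).toList ['/']).length ≤ 4) then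
    d.modify "category" 0 (· + 1)
  else if PySem.Str.endswith (pvUrl page) "/" &&
          decide ((PySem.Chars.splitOn (pvUrl page).toList ['/']).length = 4) then
    d.modify "homepage" 0 (· + 1)
  else
    d.modify "other" 0 (· + 1)

def classify_pages_py (pages : List (List (String × String))) : List (String × Int) :=
  (pages.foldl pvAStep
    (PySem.Dict.ofList [("homepage", 0), ("product", 0), ("blog", 0), ("about", 0),
                        ("contact", 0), ("category", 0), ("other", 0)])).items

-- ===== PORT B =====
-- B's lambdas: a keyword rule over a lowercased (url, title) pair
def pvRule (uws tws : List String) (p : String × String) : Bool :=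
  uws.any (fun w => PySem.Str.isIn w p.1) || tws.any (fun w => PySem.Str.isIn w p.2)

-- B's _SIEVE table
def pvSieveRules : List (String × (String × String → Bool)) :=
  [("product", pvRule ["product", "item", "buy"] ["product", "buy", "price"]),
   ("blog", pvRule ["blog", "news", "article", "post"] ["blog", "news"]),
   ("about", pvRule ["about", "company", "team"] ["about", "company"]),
   ("contact", pvRule ["contact", "support", "help"] ["contact", "support"]),
   ("category", fun p => ["category", "section", "department"].any (fun w => PySem.Str.isIn w p.1) ||
                         decide ((PySem.Chars.splitOn p.1.toList ['/']).length ≤ 4)),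
   ("homepage", fun p => PySem.Str.endswith p.1 "/" &&
                         decide ((PySem.Chars.splitOn p.1.toList ['/']).length = 4))]

def pvKeys : List String := ["homepage", "product", "blog", "about", "contact", "category", "other"]

-- B's staged loop: count the matches of each filter, pass the residue on; the final residue is "other"
def pvSieve : List (String × (String × String → Bool)) → List (String × String) → List (String × Int)
  | [], rem => [("other", (rem.length : Int))]
  | (n, keep) :: rs, rem =>
      (n, ((rem.countP keep : Nat) : Int)) :: pvSieve rs (rem.filter (fun p => !keep p))

def classify_pages_py_alt (pages : List (List (String × String))) : List (String × Int) :=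
  let remaining := pages.map (fun p => (pvUrl p, pvTitle p))
  let counts := pvSieve pvSieveRules remaining
  pvKeys.map (fun k => (k, (counts.lookup k).getD 0))

-- ===== PRECONDITION & SPEC =====
def Spec_classify_pages_py (pages : List (List (String × String))) (out : List (String × Int)) : Prop := out = classify_pages_py_alt pages
instance (pages : List (List (String × String))) (out : List (String × Int)) : Decidable (Spec_classify_pages_py pages out) := by unfold Spec_classify_pages_py; infer_instance

-- ===== CLAIM (what is proved, stated in full; the proofs are below) =====
def Claim_equal_classify_pages_py : Prop := ∀ (pages : List (List (String × String))), Dom_classify_pages_py pages → Spec_classify_pages_py pages (classify_pages_py pages)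

-- ===== LEMMAS AND PROOFS =====

-- the first rule of `rs` that matches `p` (Python's first firing elif branch), "other" if none
def pvFirstName : List (String × (String × String → Bool)) → (String × String) → String
  | [], _ => "other"
  | (n, keep) :: rs, p => if keep p then n else pvFirstName rs p

def pvCategory (page : List (String × String)) : String :=
  pvFirstName pvSieveRules (pvUrl page, pvTitle page)

-- A's loop body increments exactly the key of the first matching rule
theorem pvAStep_eq_modify (d : PySem.Dict String Int) (page : List (String × String)) :
    pvAStep d page = d.modify (pvCategory page) 0 (· + 1) := by
  unfold pvAStep pvCategory pvSieveRules pvRule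
  simp only [pvFirstName]
  split_ifs <;> rfl

theorem pvFirstName_mem (rs : List (String × (String × String → Bool))) (p : String × String) :
    pvFirstName rs p ∈ rs.map Prod.fst ++ ["other"] := by
  induction rs with
  | nil => simp [pvFirstName]
  | cons r t ih =>
    obtain ⟨n, keep⟩ := r
    by_cases h : keep p
    · simp [pvFirstName, h]
    · simp only [pvFirstName, h, Bool.false_eq_true, if_false, List.map_cons, List.cons_append]
      exact List.mem_cons_of_mem _ ih

-- counting first-matches of keys below the head = counting on the residue of the head filter
theorem pvCountP_tail (keep : String × String → Bool) (n k : String)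
    (g : String × String → String) (hk : k ≠ n) (rem : List (String × String)) :
    rem.countP (fun p => (if keep p then n else g p) == k) =
      (rem.filter (fun p => !keep p)).countP (fun p => g p == k) := by
  induction rem with
  | nil => rfl
  | cons p t ih =>
    by_cases h : keep p
    · simp [List.countP_cons, h, ih, Ne.symm hk]
    · simp [List.countP_cons, h, ih]

-- the sieve computes, for every key, the number of elements whose FIRST matching rule is that key
theorem pvSieve_eq (rs : List (String × (String × String → Bool))) (rem : List (String × String))
    (hnd : (rs.map Prod.fst).Nodup) (ho : "other" ∉ rs.map Prod.fst) :
    pvSieve rs rem = (rs.map Prod.fst ++ ["other"]).map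
      (fun k => (k, ((rem.countP (fun p => pvFirstName rs p == k) : Nat) : Int))) := by
  induction rs generalizing rem with
  | nil =>
    simp [pvSieve, pvFirstName]
  | cons r t ih =>
    obtain ⟨n, keep⟩ := r
    rw [List.map_cons] at hnd ho
    have hn_t : n ∉ t.map Prod.fst := (List.nodup_cons.1 hnd).1
    have hnd' : (t.map Prod.fst).Nodup := (List.nodup_cons.1 hnd).2
    have hn_other : n ≠ "other" := by
      intro he; exact ho (by simp [he])
    have ho' : "other" ∉ t.map Prod.fst := fun h => ho (List.mem_cons_of_mem _ h)
    simp only [pvSieve, List.map_cons, List.cons_append, List.map]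
    refine List.cons_eq_cons.2 ⟨?_, ?_⟩
    · -- head: first-match = n iff keep fires
      have hhd : rem.countP (fun p => pvFirstName ((n, keep) :: t) p == n) = rem.countP keep := by
        apply List.countP_congr
        intro p _
        by_cases h : keep p
        · simp [pvFirstName, h]
        · have hne : pvFirstName t p ≠ n := by
            intro he
            rcases List.mem_append.1 (pvFirstName_mem t p) with h' | h'
            · exact hn_t (he ▸ h')
            · simp only [List.mem_singleton] at h'
              exact hn_other (he.symm.trans h')
          simp [pvFirstName, h, hne]
      rw [hhd]
    · rw [ih _ hnd' ho']
      refine List.map_congr_left ?_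
      intro k hk
      have hk_ne : k ≠ n := by
        rcases List.mem_append.1 hk with h' | h'
        · exact fun he => hn_t (he ▸ h')
        · simp only [List.mem_singleton] at h'
          subst h'
          exact fun he => hn_other he.symm
      have htl : rem.countP (fun p => pvFirstName ((n, keep) :: t) p == k) =
          (rem.filter (fun p => !keep p)).countP (fun p => pvFirstName t p == k) := by
        simpa [pvFirstName] using pvCountP_tail keep n k (pvFirstName t) hk_ne rem
      rw [htl]

theorem pvLookup_map_self (l : List String) (h : String → Int) (k : String) (hk : k ∈ l) :
    List.lookup k (l.map fun n => (n, h n)) = some (h k) := by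
  induction l with
  | nil => cases hk
  | cons a t ih =>
    by_cases he : k = a
    · simp [he]
    · have hne : (k == a) = false := by simp [he]
      have hkt : k ∈ t := (List.mem_cons.1 hk).resolve_left he
      simpa [List.lookup, hne] using ih hkt

-- B's classifier always returns one of the seven keys
theorem pvCategory_mem_keys (page : List (String × String)) : pvCategory page ∈ pvKeys := by
  have h := pvFirstName_mem pvSieveRules (pvUrl page, pvTitle page)
  have hl : pvSieveRules.map Prod.fst ++ ["other"] =
      ["product", "blog", "about", "contact", "category", "homepage", "other"] := rfl
  rw [hl] at h
  unfold pvCategory pvKeys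
  simp only [List.mem_cons, List.not_mem_nil, or_false] at h ⊢
  rcases h with h | h | h | h | h | h | h <;> simp [h]

-- A's result: for every key, the number of pages classified to it
theorem pvA_eq_counts (pages : List (List (String × String))) :
    classify_pages_py pages =
      pvKeys.map (fun k => (k, (((pages.map pvCategory).count k : Nat) : Int))) := by
  unfold classify_pages_py
  have hfun : pvAStep = fun d p => d.modify (pvCategory p) 0 (· + 1) :=
    funext fun d => funext fun p => pvAStep_eq_modify d p
  rw [hfun]
  set d0 : PySem.Dict String Int :=
    PySem.Dict.ofList [("homepage", 0), ("product", 0), ("blog", 0), ("about", 0),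
                       ("contact", 0), ("category", 0), ("other", 0)] with hd0
  have hmap : List.foldl (fun d p => PySem.Dict.modify d (pvCategory p) 0 (· + 1)) d0 pages =
      List.foldl (fun d x => PySem.Dict.modify d x 0 (· + 1)) d0 (pages.map pvCategory) := by
    rw [List.foldl_map]
  rw [hmap]
  set cats := pages.map pvCategory with hcats
  have hmem : ∀ c ∈ cats, c ∈ pvKeys := by
    intro c hc
    rcases List.mem_map.1 (hcats ▸ hc) with ⟨p, _, rfl⟩
    exact pvCategory_mem_keys p
  have hkeys : (cats.foldl (fun d x => d.modify x 0 (· + 1)) d0).keys = pvKeys := by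
    rw [PySem.Dict.keys_foldl_modify]
    have hk0 : d0.keys = pvKeys := by rw [hd0]; rfl
    rw [hk0, PySem.Set.update_eq_append_filter]
    have : (PySem.Set.ofList cats).filter (fun y => !(PySem.Set.contains pvKeys y)) = [] := by
      rw [List.filter_eq_nil_iff]
      intro a ha
      have : a ∈ cats := (PySem.Set.mem_ofList _ _).1 ha
      simp [PySem.Set.contains_eq_listContains, hmem a this]
    rw [this, List.append_nil]
  have hnd : (cats.foldl (fun d x => d.modify x 0 (· + 1)) d0).keys.Nodup := by
    rw [hkeys]; decide
  rw [PySem.Dict.items_eq_map_keys _ hnd 0, hkeys]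
  refine List.map_congr_left ?_
  intro k hk
  rw [PySem.Dict.getD_foldl_modify_add_one]
  have h0 : d0.getD k 0 = 0 := by fin_cases hk <;> rfl
  rw [h0, zero_add]

theorem classify_pages_py_spec : Claim_equal_classify_pages_py := by
  intro pages _
  unfold Spec_classify_pages_py
  rw [pvA_eq_counts]
  simp only [classify_pages_py_alt]
  rw [pvSieve_eq pvSieveRules _ (by decide) (by decide)]
  refine List.map_congr_left ?_
  intro k hk
  have hmem : k ∈ (pvSieveRules.map Prod.fst ++ ["other"]) := by
    fin_cases hk <;> decide
  rw [pvLookup_map_self _ _ _ hmem]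
  simp only [Option.getD_some]
  congr 1
  rw [List.count_eq_countP, List.countP_map, List.countP_map]
  rfl
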